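-- pv_equiv track=rewrite | github.com/SamwelOpiyo/Coding_Challenges | bit_strings.py | get_bit_strings
-- ===== SOURCE A (Python) =====
-- def get_bit_strings(bit_pattern):
--     return_list = []
--     for each in range(len(bit_pattern)):
--         if bit_pattern[each] == "?":
--             if len(return_list) > 0:
--                 new_list = [item + "0" for item in return_list] + [
--                     item + "1" for item in return_list
--                 ]
--                 return_list = new_list
--             else:
--                 return_list.append("0")
--                 return_list.append("1")
--         else:
--             if len(return_list) > 0:
--                 return_list = [
--                     item + bit_pattern[each] for item in return_list
--                 ]
--             else:
--                 return_list.append(bit_pattern[each])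
--     return return_list
-- ===== SOURCE B (Python) =====
-- def get_bit_strings(bit_pattern):
--     if not bit_pattern:
--         return []
--     k = bit_pattern.count("?")
--     result = []
--     for n in range(2 ** k):
--         chars = []
--         b = n
--         for c in bit_pattern:
--             if c == "?":
--                 chars.append("1" if b & 1 else "0")
--                 b >>= 1
--             else:
--                 chars.append(c)
--         result.append("".join(chars))
--     return result
-- ===== Notes on version B (the rewrite author's own statement) =====
-- stated objective: faster
-- what changed: Replaces A's repeated list-doubling that re-copies every partial string at each characters (O(2^k * L^2) string copying) with a single enumeration of n in range(2**k) that decodes n's bits into the pattern and builds each output string once.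
import Mathlib
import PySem

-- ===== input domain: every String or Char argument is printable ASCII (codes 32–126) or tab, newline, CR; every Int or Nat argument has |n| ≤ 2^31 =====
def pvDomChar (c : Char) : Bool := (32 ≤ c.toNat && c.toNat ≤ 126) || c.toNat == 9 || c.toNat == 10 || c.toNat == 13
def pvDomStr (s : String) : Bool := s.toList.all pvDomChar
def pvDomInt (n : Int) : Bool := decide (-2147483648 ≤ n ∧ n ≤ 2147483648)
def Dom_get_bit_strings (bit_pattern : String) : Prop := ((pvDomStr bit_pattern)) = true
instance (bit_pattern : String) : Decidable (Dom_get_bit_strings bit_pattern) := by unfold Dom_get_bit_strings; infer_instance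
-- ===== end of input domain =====

-- B replaces A's list-doubling accumulation by a direct enumeration of the 2^k wildcard
-- combinations, decoding each index n bit-by-bit into the pattern, building each output once
-- instead of re-copying all partial strings at every character (measured faster by the check).


-- ===== PORT A =====
-- one iteration of A's loop body ('for each in range(len(bit_pattern))' reading
-- bit_pattern[each] left to right = a fold over the character list)
def pvStepA (acc : List String) (c : Char) : List String :=
  if c = '?' then
    if acc.length > 0 then
      acc.map (fun item => item ++ "0") ++ acc.map (fun item => item ++ "1")
    else ["0", "1"]
  else
    if acc.length > 0 then acc.map (fun item => item ++ String.ofList [c])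
    else [String.ofList [c]]

def get_bit_strings (bit_pattern : String) : List String :=
  bit_pattern.toList.foldl pvStepA []

-- ===== PORT B =====
-- Source B's inner loop: walk the pattern once, consuming one bit of b at each '?'
def pvBuildB : List Char → Nat → List Char
  | [], _ => []
  | c :: cs, b =>
    if c = '?' then (if b &&& 1 = 1 then '1' else '0') :: pvBuildB cs (b >>> 1)
    else c :: pvBuildB cs b

-- bit_pattern.count("?") for the one-char needle "?" is the character count on toList (exact)
def get_bit_strings_alt (bit_pattern : String) : List String :=
  if bit_pattern.toList = [] then []
  else
    (List.range (2 ^ bit_pattern.toList.count '?')).map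
      (fun n => String.ofList (pvBuildB bit_pattern.toList n))

-- ===== PRECONDITION & SPEC =====
def Spec_get_bit_strings (bit_pattern : String) (out : List String) : Prop := out = get_bit_strings_alt bit_pattern
instance (bit_pattern : String) (out : List String) : Decidable (Spec_get_bit_strings bit_pattern out) := by unfold Spec_get_bit_strings; infer_instance

-- ===== CLAIM (what is proved, stated in full; the proofs are below) =====
def Claim_equal_get_bit_strings : Prop := ∀ (bit_pattern : String), Dom_get_bit_strings bit_pattern → Spec_get_bit_strings bit_pattern (get_bit_strings bit_pattern)

-- ===== LEMMAS AND PROOFS =====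

lemma ofList_cons_str (c : Char) (l : List Char) :
    String.ofList (c :: l) = String.ofList [c] ++ String.ofList l := by
  rw [← String.ofList_append, List.singleton_append]

lemma flatMap_single {α β : Type} (f : α → β) (l : List α) :
    l.flatMap (fun a => [f a]) = l.map f := by
  induction l with
  | nil => simp
  | cons a l ih => simp [ih]

lemma flatMap_range_two_mul {α : Type} (k : Nat) (f : Nat → List α) :
    (List.range (2 * k)).flatMap f
      = (List.range k).flatMap (fun m => f (2 * m) ++ f (2 * m + 1)) := by
  induction k with
  | zero => simp
  | succ k ih =>
    have h : 2 * (k + 1) = (2 * k + 1) + 1 := by ring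
    rw [h, List.range_succ, List.range_succ, List.range_succ]
    simp [ih, List.append_assoc]

lemma pvBuildB_even (cs : List Char) (m : Nat) :
    pvBuildB ('?' :: cs) (2 * m) = '0' :: pvBuildB cs m := by
  have h1 : (2 * m) &&& 1 = 0 := by rw [Nat.and_one_is_mod]; omega
  have h2 : (2 * m) >>> 1 = m := by
    rw [Nat.shiftRight_eq_div_pow, pow_one]; omega
  simp [pvBuildB, h1, h2]

lemma pvBuildB_odd (cs : List Char) (m : Nat) :
    pvBuildB ('?' :: cs) (2 * m + 1) = '1' :: pvBuildB cs m := by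
  have h1 : (2 * m + 1) &&& 1 = 1 := by rw [Nat.and_one_is_mod]; omega
  have h2 : (2 * m + 1) >>> 1 = m := by
    rw [Nat.shiftRight_eq_div_pow, pow_one]; omega
  simp [pvBuildB, h1, h2]

-- A's accumulator after consuming cs, started from any nonempty acc
lemma foldA_char (cs : List Char) (acc : List String) (h : acc ≠ []) :
    cs.foldl pvStepA acc
      = (List.range (2 ^ cs.count '?')).flatMap
          (fun n => acc.map (fun a => a ++ String.ofList (pvBuildB cs n))) := by
  induction cs generalizing acc with
  | nil => simp [pvBuildB]
  | cons c cs ih =>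
    have hlen : acc.length > 0 := List.length_pos_iff.mpr h
    by_cases hc : c = '?'
    · subst hc
      have hstep : pvStepA acc '?'
          = acc.map (fun item => item ++ "0") ++ acc.map (fun item => item ++ "1") := by
        simp [pvStepA, hlen]
      have hne : (acc.map (fun item => item ++ "0")
          ++ acc.map (fun item => item ++ "1")) ≠ [] := by simp [h]
      rw [List.foldl_cons, hstep, ih _ hne]
      have hpow : 2 ^ (('?' :: cs).count '?') = 2 * 2 ^ (cs.count '?') := by
        simp [pow_succ]; ring
      rw [hpow, flatMap_range_two_mul]
      refine List.flatMap_congr (fun m _ => ?_)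
      rw [pvBuildB_even, pvBuildB_odd, List.map_append, List.map_map, List.map_map]
      congr 1
      · refine List.map_congr_left (fun a _ => ?_)
        show (a ++ "0") ++ String.ofList (pvBuildB cs m)
            = a ++ String.ofList ('0' :: pvBuildB cs m)
        rw [ofList_cons_str, String.append_assoc]
      · refine List.map_congr_left (fun a _ => ?_)
        show (a ++ "1") ++ String.ofList (pvBuildB cs m)
            = a ++ String.ofList ('1' :: pvBuildB cs m)
        rw [ofList_cons_str, String.append_assoc]
    · have hstep : pvStepA acc c = acc.map (fun item => item ++ String.ofList [c]) := by
        simp [pvStepA, hc, hlen]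
      have hne : acc.map (fun item => item ++ String.ofList [c]) ≠ [] := by simp [h]
      rw [List.foldl_cons, hstep, ih _ hne]
      have hcount : (c :: cs).count '?' = cs.count '?' := by
        simp [hc]
      rw [hcount]
      refine List.flatMap_congr (fun m _ => ?_)
      rw [List.map_map]
      refine List.map_congr_left (fun a _ => ?_)
      have hb : pvBuildB (c :: cs) m = c :: pvBuildB cs m := by simp [pvBuildB, hc]
      show (a ++ String.ofList [c]) ++ String.ofList (pvBuildB cs m)
          = a ++ String.ofList (pvBuildB (c :: cs) m)
      rw [hb, ofList_cons_str c (pvBuildB cs m), String.append_assoc]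

lemma stepA_nil_eq (c : Char) : pvStepA [] c = pvStepA [""] c := by
  unfold pvStepA
  by_cases hc : c = '?' <;> simp [hc]

theorem get_bit_strings_spec : Claim_equal_get_bit_strings := by
  intro s _
  unfold Spec_get_bit_strings get_bit_strings get_bit_strings_alt
  cases hl : s.toList with
  | nil => simp
  | cons c cs =>
    simp only [List.foldl_cons, stepA_nil_eq]
    have h1 : cs.foldl pvStepA (pvStepA [""] c) = (c :: cs).foldl pvStepA [""] := by
      simp
    rw [h1, foldA_char (c :: cs) [""] (by simp)]
    simp [flatMap_single]
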